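-- pv_equiv track=rewrite | github.com/jashvira/VisGeomBench | visual_geometry_bench/verification/convex_hull_ordering.py | _is_valid_index_sequence
-- ===== SOURCE A (Python) =====
-- from typing import Iterable, List, Sequence
--
-- def _is_valid_index_sequence(seq: Sequence[object]) -> bool:
--     """Return True if seq is a list-like of non-negative ints with >=3 unique entries."""
--     if not isinstance(seq, list):
--         return False
--     if len(seq) < 3:
--         return False
--     seen: set[int] = set()
--     for item in seq:
--         if not isinstance(item, int) or item < 0:
--             return False
--         if item in seen:
--             return False
--         seen.add(item)
--     return True
-- ===== SOURCE B (Python) =====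
-- def _is_valid_index_sequence(seq) -> bool:
--     """Return True if seq is a list-like of non-negative ints with >=3 unique entries."""
--     if not isinstance(seq, list):
--         return False
--     if len(seq) < 3:
--         return False
--     if any(not isinstance(x, int) or x < 0 for x in seq):
--         return False
--     s = sorted(seq)
--     return all(a < b for a, b in zip(s, s[1:]))
-- ===== Notes on version B (the rewrite author's own statement) =====
-- stated objective: alternative
-- what changed: Duplicate detection by sorting and checking that every adjacent pair is strictly increasing, instead of A's single pass maintaining a hash set with early returns; the type/non-negativity check becomes its own any() pass.
import Mathlib
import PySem

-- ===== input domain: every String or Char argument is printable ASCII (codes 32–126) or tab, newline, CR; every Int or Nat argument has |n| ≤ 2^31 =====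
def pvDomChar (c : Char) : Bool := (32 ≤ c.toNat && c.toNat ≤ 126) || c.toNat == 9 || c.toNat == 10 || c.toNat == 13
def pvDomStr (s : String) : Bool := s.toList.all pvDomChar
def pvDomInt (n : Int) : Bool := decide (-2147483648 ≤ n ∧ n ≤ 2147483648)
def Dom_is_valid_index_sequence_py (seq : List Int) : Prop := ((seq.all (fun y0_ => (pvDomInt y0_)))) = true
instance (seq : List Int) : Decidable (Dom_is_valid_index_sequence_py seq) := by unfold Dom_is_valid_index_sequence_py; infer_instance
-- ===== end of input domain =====

-- B detects duplicates by sorting and checking adjacent pairs are strictly increasing,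
-- instead of A's single fused loop over a 'seen' set; objective: alternative algorithm.


-- ===== PORT A =====
-- the 'for item in seq' loop: early-return on a negative item or a repeat, else add to 'seen'
def isvLoopA (seen : PySem.Set Int) : List Int → Bool
  | [] => true
  | item :: rest =>
      if item < 0 then false
      else if PySem.Set.contains seen item then false
      else isvLoopA (PySem.Set.add seen item) rest

def is_valid_index_sequence_py (seq : List Int) : Bool :=
  -- 'isinstance(seq, list)' always holds for the typed argument
  if seq.length < 3 then false
  else isvLoopA PySem.Set.empty seq

-- ===== PORT B =====
def is_valid_index_sequence_py_alt (seq : List Int) : Bool :=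
  if seq.length < 3 then false
  else if seq.any (fun x => decide (x < 0)) then false
  else
    let s := PySem.List.sorted seq (fun x => x) false
    (s.zip (PySem.List.slice s (some 1) none)).all (fun p => decide (p.1 < p.2))

-- ===== PRECONDITION & SPEC =====
def Spec_is_valid_index_sequence_py (seq : List Int) (out : Bool) : Prop := out = is_valid_index_sequence_py_alt seq
instance (seq : List Int) (out : Bool) : Decidable (Spec_is_valid_index_sequence_py seq out) := by unfold Spec_is_valid_index_sequence_py; infer_instance

-- ===== CLAIM (what is proved, stated in full; the proofs are below) =====
def Claim_equal_is_valid_index_sequence_py : Prop := ∀ (seq : List Int), Dom_is_valid_index_sequence_py seq → Spec_is_valid_index_sequence_py seq (is_valid_index_sequence_py seq)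

-- ===== LEMMAS AND PROOFS =====

-- A's loop succeeds iff all items are non-negative, pairwise distinct, and fresh w.r.t. 'seen'
theorem isvLoopA_iff (xs : List Int) : ∀ (s : PySem.Set Int),
    isvLoopA s xs = true ↔ ((∀ x ∈ xs, 0 ≤ x) ∧ xs.Nodup ∧ ∀ x ∈ xs, x ∉ s) := by
  induction xs with
  | nil => intro s; simp [isvLoopA]
  | cons x xs ih =>
      intro s
      by_cases hx : x < 0
      · simp only [isvLoopA, if_pos hx, Bool.false_eq_true, false_iff]
        rintro ⟨h, -⟩; exact absurd (h x (List.mem_cons_self)) (by omega)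
      · by_cases hc : x ∈ s
        · have hct : PySem.Set.contains s x = true := (PySem.Set.contains_iff _ _).2 hc
          simp only [isvLoopA, if_neg hx, hct, if_true, Bool.false_eq_true, false_iff]
          rintro ⟨-, -, h⟩; exact absurd hc (h x List.mem_cons_self)
        · have hcf : PySem.Set.contains s x = false := by
            cases hcc : PySem.Set.contains s x
            · rfl
            · exact absurd ((PySem.Set.contains_iff _ _).1 hcc) hc
          simp only [isvLoopA, if_neg hx, hcf, Bool.false_eq_true, if_false]
          rw [ih]
          constructor
          · rintro ⟨h1, h2, h3⟩
            refine ⟨?_, ?_, ?_⟩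
            · intro y hy
              rcases List.mem_cons.1 hy with rfl | hy
              · omega
              · exact h1 y hy
            · exact List.nodup_cons.2 ⟨fun hmem => (h3 x hmem) ((PySem.Set.mem_add _ _ _).2 (Or.inr rfl)), h2⟩
            · intro y hy
              rcases List.mem_cons.1 hy with rfl | hy
              · exact hc
              · intro hys
                exact (h3 y hy) ((PySem.Set.mem_add _ _ _).2 (Or.inl hys))
          · rintro ⟨h1, h2, h3⟩
            have h2' := List.nodup_cons.1 h2
            refine ⟨fun y hy => h1 y (List.mem_cons_of_mem _ hy), h2'.2, ?_⟩
            intro y hy hmem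
            rcases (PySem.Set.mem_add _ _ _).1 hmem with hys | rfl
            · exact (h3 y (List.mem_cons_of_mem _ hy)) hys
            · exact h2'.1 hy

theorem A_iff (seq : List Int) : is_valid_index_sequence_py seq = true ↔
    (3 ≤ seq.length ∧ (∀ x ∈ seq, 0 ≤ x) ∧ seq.Nodup) := by
  unfold is_valid_index_sequence_py
  by_cases hlen : seq.length < 3
  · simp only [if_pos hlen, Bool.false_eq_true, false_iff]
    rintro ⟨h, -⟩; omega
  · rw [if_neg hlen, isvLoopA_iff]
    constructor
    · rintro ⟨h1, h2, -⟩; exact ⟨by omega, h1, h2⟩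
    · rintro ⟨-, h1, h2⟩
      exact ⟨h1, h2, by intro x _ hx; simp [PySem.Set.empty] at hx⟩

-- the adjacent-pair test on (s, s.tail) is exactly Chain' (<)
theorem zip_tail_all_lt_iff (s : List Int) :
    ((s.zip s.tail).all (fun p => decide (p.1 < p.2)) = true) ↔ List.IsChain (· < ·) s := by
  induction s with
  | nil => simp
  | cons x xs ih =>
      cases xs with
      | nil => simp
      | cons y ys =>
          simp only [List.tail_cons, List.zip_cons_cons, List.all_cons, Bool.and_eq_true,
            decide_eq_true_eq, List.isChain_cons_cons]
          rw [← ih]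
          simp [List.tail_cons]

theorem B_iff (seq : List Int) : is_valid_index_sequence_py_alt seq = true ↔
    (3 ≤ seq.length ∧ (∀ x ∈ seq, 0 ≤ x) ∧ seq.Nodup) := by
  unfold is_valid_index_sequence_py_alt
  by_cases hlen : seq.length < 3
  · simp only [if_pos hlen, Bool.false_eq_true, false_iff]
    rintro ⟨h, -⟩; omega
  · rw [if_neg hlen]
    by_cases hneg : seq.any (fun x => decide (x < 0)) = true
    · rw [hneg]
      simp only [if_true, Bool.false_eq_true, false_iff]
      rintro ⟨-, h, -⟩
      rcases List.any_eq_true.1 hneg with ⟨x, hx, hxlt⟩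
      exact absurd (h x hx) (by simpa using hxlt)
    · have hf : seq.any (fun x => decide (x < 0)) = false := by
        cases h : seq.any (fun x => decide (x < 0))
        · rfl
        · exact absurd h hneg
      rw [hf]
      simp only [Bool.false_eq_true, if_false]
      rw [PySem.List.slice_from_one, zip_tail_all_lt_iff]
      have hperm := PySem.List.sorted_perm seq (fun x => x) false
      have hsorted : (PySem.List.sorted seq (fun x => x) false).Pairwise (· ≤ ·) := by
        simpa using PySem.List.sorted_pairwise seq (fun x => x)
      have hnn : ∀ x ∈ seq, 0 ≤ x := by
        intro x hx
        by_contra hlt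
        exact hneg (List.any_eq_true.2 ⟨x, hx, by simpa using hlt⟩)
      rw [List.isChain_iff_pairwise]
      constructor
      · intro hp
        exact ⟨by omega, hnn, hperm.nodup (hp.imp ne_of_lt)⟩
      · rintro ⟨-, -, hnd⟩
        have hnd' : (PySem.List.sorted seq (fun x => x) false).Nodup := hperm.symm.nodup hnd
        exact (hsorted.and hnd').imp (fun {a b} h => lt_of_le_of_ne h.1 h.2)

-- ===== VERDICT (by name: the statement is the Claim_ definition above) =====
theorem is_valid_index_sequence_py_spec : Claim_equal_is_valid_index_sequence_py := by
  intro seq _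
  unfold Spec_is_valid_index_sequence_py
  rw [Bool.eq_iff_iff, A_iff, B_iff]
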